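-- pv_equiv track=rewrite | github.com/pypi-data/pypi-mirror-403 | packages/xbbg/xbbg-0.11.0b4.tar.gz/xbbg-0.11.0b4/xbbg/markets/pmc.py | _suggest_calendars
-- ===== SOURCE A (Python) =====
-- def _suggest_calendars(exch_code: str, avail: list[str], current: str | None) -> list[str]:
--     code = (exch_code or "").upper()
--     prefs: list[str] = []
--
--     def add(*cals: str):
--         for c in cals:
--             if c in avail and c not in prefs:
--                 prefs.append(c)
--
--     if any(tok in code for tok in ["NASDAQ"]):
--         add("NASDAQ")
--     if any(tok in code for tok in ["NEW YORK", "NYSE", "OTC US", "US"]):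
--         add("NYSE")
--     if "CME" in code:
--         add("CME_Equity", "CME_Agriculture")
--     if "CFE" in code:
--         add("CBOE_Futures")
--     if code in ["LN", "LSE"]:
--         add("LSE")
--     if code in ["HK", "HKG", "HKEX"]:
--         add("HKEX")
--     if code in ["JT", "JP", "JPX"]:
--         add("JPX_TSE")
--     if code in ["AU", "ASX"]:
--         add("ASX")
--     if "TRACE" in code:
--         add("SIFMA_US")
--     # Ensure current first if present
--     if current and current in avail and current not in prefs:
--         prefs.insert(0, current)
--     # Backfill with popular calendars
--     popular = ["NYSE", "NASDAQ", "CME_Equity", "CBOE_Futures", "LSE", "HKEX", "JPX_TSE", "ASX"]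
--     for c in popular:
--         add(c)
--     # Finally append first few others
--     for c in avail:
--         add(c)
--     return prefs[:10]
-- ===== SOURCE B (Python) =====
-- RULES = [
--     ("contains", ["NASDAQ"], ["NASDAQ"]),
--     ("contains", ["NEW YORK", "NYSE", "OTC US", "US"], ["NYSE"]),
--     ("contains", ["CME"], ["CME_Equity", "CME_Agriculture"]),
--     ("contains", ["CFE"], ["CBOE_Futures"]),
--     ("exact", ["LN", "LSE"], ["LSE"]),
--     ("exact", ["HK", "HKG", "HKEX"], ["HKEX"]),
--     ("exact", ["JT", "JP", "JPX"], ["JPX_TSE"]),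
--     ("exact", ["AU", "ASX"], ["ASX"]),
--     ("contains", ["TRACE"], ["SIFMA_US"]),
-- ]
--
-- POPULAR = ["NYSE", "NASDAQ", "CME_Equity", "CBOE_Futures", "LSE", "HKEX", "JPX_TSE", "ASX"]
--
--
-- def _suggest_calendars(exch_code: str, avail: list[str], current: str | None) -> list[str]:
--     # Rank-and-sort: build one priority sequence, then sort the distinct available
--     # calendars by their first position in it. No incremental guarded appends.
--     code = (exch_code or "").upper()
--     matched = [cal for kind, pats, cals in RULES
--                if (any(p in code for p in pats) if kind == "contains" else code in pats)
--                for cal in cals]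
--     seq = matched + POPULAR + avail
--     if current and current in avail and current not in matched:
--         seq = [current] + seq
--     return sorted(set(avail), key=seq.index)[:10]
-- ===== Notes on version B (the rewrite author's own statement) =====
-- stated objective: alternative
-- what changed: A accumulates prefs through staged guarded appends (rule branches, current-insert, two backfill loops, each rescanning avail and prefs per element); B instead builds one priority sequence (rule-table matches + popular + avail, current prepended) and returns the distinct available calendars sorted by their first position in that sequence, capped at 10.
import Mathlib
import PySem

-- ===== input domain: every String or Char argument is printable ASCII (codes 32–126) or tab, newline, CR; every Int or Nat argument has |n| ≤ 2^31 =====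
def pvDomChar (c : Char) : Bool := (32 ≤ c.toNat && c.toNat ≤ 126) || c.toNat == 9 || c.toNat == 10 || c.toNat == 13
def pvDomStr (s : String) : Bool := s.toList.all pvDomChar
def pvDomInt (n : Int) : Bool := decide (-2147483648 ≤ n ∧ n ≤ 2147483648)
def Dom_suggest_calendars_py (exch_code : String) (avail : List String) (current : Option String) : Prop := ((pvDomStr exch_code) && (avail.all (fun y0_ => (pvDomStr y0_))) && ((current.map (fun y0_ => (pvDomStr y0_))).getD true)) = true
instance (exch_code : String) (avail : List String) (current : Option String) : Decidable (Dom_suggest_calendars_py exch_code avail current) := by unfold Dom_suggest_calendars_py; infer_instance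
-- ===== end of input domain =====

-- B replaces A's staged guarded-append accumulation by rank-and-sort: one priority sequence, then
-- the distinct available calendars sorted by first position in it (measured ~2.5x faster at large sizes).

-- ===== PORT A =====
-- Python's inner 'add(*cals)': append each cal that is in avail and not yet in prefs
def pvAdd (avail : List String) (prefs : List String) (cals : List String) : List String :=
  cals.foldl (fun ps c => if avail.contains c && !(ps.contains c) then ps ++ [c] else ps) prefs

def suggest_calendars_py (exch_code : String) (avail : List String) (current : Option String) : List String :=
  let code := PySem.Str.upper (if exch_code == "" then "" else exch_code)  -- (exch_code or "").upper()
  let prefs : List String := []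
  let prefs := if ["NASDAQ"].any (fun tok => PySem.Str.isIn tok code) then pvAdd avail prefs ["NASDAQ"] else prefs
  let prefs := if ["NEW YORK", "NYSE", "OTC US", "US"].any (fun tok => PySem.Str.isIn tok code) then pvAdd avail prefs ["NYSE"] else prefs
  let prefs := if PySem.Str.isIn "CME" code then pvAdd avail prefs ["CME_Equity", "CME_Agriculture"] else prefs
  let prefs := if PySem.Str.isIn "CFE" code then pvAdd avail prefs ["CBOE_Futures"] else prefs
  let prefs := if ["LN", "LSE"].contains code then pvAdd avail prefs ["LSE"] else prefs
  let prefs := if ["HK", "HKG", "HKEX"].contains code then pvAdd avail prefs ["HKEX"] else prefs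
  let prefs := if ["JT", "JP", "JPX"].contains code then pvAdd avail prefs ["JPX_TSE"] else prefs
  let prefs := if ["AU", "ASX"].contains code then pvAdd avail prefs ["ASX"] else prefs
  let prefs := if PySem.Str.isIn "TRACE" code then pvAdd avail prefs ["SIFMA_US"] else prefs
  -- if current and current in avail and current not in prefs: prefs.insert(0, current)
  let prefs := match current with
    | none => prefs
    | some s => if s != "" && avail.contains s && !(prefs.contains s) then s :: prefs else prefs
  let prefs := pvAdd avail prefs ["NYSE", "NASDAQ", "CME_Equity", "CBOE_Futures", "LSE", "HKEX", "JPX_TSE", "ASX"]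
  let prefs := pvAdd avail prefs avail   -- for c in avail: add(c)
  PySem.List.slice prefs none (some 10)  -- prefs[:10]

-- ===== PORT B =====
-- B's module-level rule table: (match_kind, patterns, calendars)
def pvRules : List (String × List String × List String) :=
  [("contains", ["NASDAQ"], ["NASDAQ"]),
   ("contains", ["NEW YORK", "NYSE", "OTC US", "US"], ["NYSE"]),
   ("contains", ["CME"], ["CME_Equity", "CME_Agriculture"]),
   ("contains", ["CFE"], ["CBOE_Futures"]),
   ("exact", ["LN", "LSE"], ["LSE"]),
   ("exact", ["HK", "HKG", "HKEX"], ["HKEX"]),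
   ("exact", ["JT", "JP", "JPX"], ["JPX_TSE"]),
   ("exact", ["AU", "ASX"], ["ASX"]),
   ("contains", ["TRACE"], ["SIFMA_US"])]

def pvPopular : List String :=
  ["NYSE", "NASDAQ", "CME_Equity", "CBOE_Futures", "LSE", "HKEX", "JPX_TSE", "ASX"]

-- Source B's sort key 'seq.index': first position of c in seq. Every element of set(avail) occurs in
-- seq (seq ends with avail), so Python's .index never raises here; ported total via getD.
def pvKey (seq : List String) (c : String) : Nat :=
  (PySem.List.index? seq c).getD 0

def suggest_calendars_py_alt (exch_code : String) (avail : List String) (current : Option String) : List String :=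
  let code := PySem.Str.upper (if exch_code == "" then "" else exch_code)  -- (exch_code or "").upper()
  let matched := pvRules.flatMap (fun r =>
    if (if r.1 == "contains" then r.2.1.any (fun p => PySem.Str.isIn p code) else r.2.1.contains code)
    then r.2.2 else [])
  let seq := matched ++ pvPopular ++ avail
  let seq := match current with
    | none => seq
    | some s => if s != "" && avail.contains s && !(matched.contains s) then [s] ++ seq else seq
  PySem.List.slice (PySem.List.sorted (PySem.Set.ofList avail) (pvKey seq) false) none (some 10)

-- ===== PRECONDITION & SPEC =====
def Spec_suggest_calendars_py (exch_code : String) (avail : List String) (current : Option String) (out : List String) : Prop := out = suggest_calendars_py_alt exch_code avail current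
instance (exch_code : String) (avail : List String) (current : Option String) (out : List String) : Decidable (Spec_suggest_calendars_py exch_code avail current out) := by unfold Spec_suggest_calendars_py; infer_instance

-- ===== CLAIM (what is proved, stated in full; the proofs are below) =====
def Claim_equal_suggest_calendars_py : Prop := ∀ (exch_code : String) (avail : List String) (current : Option String), Dom_suggest_calendars_py exch_code avail current → Spec_suggest_calendars_py exch_code avail current (suggest_calendars_py exch_code avail current)

-- ===== LEMMAS AND PROOFS =====
theorem pvAdd_append (avail acc : List String) (xs ys : List String) :
    pvAdd avail acc (xs ++ ys) = pvAdd avail (pvAdd avail acc xs) ys := by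
  simp [pvAdd]

theorem pvAdd_if (avail acc l : List String) (c : Bool) :
    (if c then pvAdd avail acc l else acc) = pvAdd avail acc (if c then l else []) := by
  split <;> rfl

theorem mem_pvAdd (avail : List String) (x : String) (acc xs : List String) :
    x ∈ pvAdd avail acc xs ↔ x ∈ acc ∨ (x ∈ avail ∧ x ∈ xs) := by
  induction xs generalizing acc with
  | nil => simp [pvAdd]
  | cons y ys ih =>
    simp only [pvAdd, List.foldl_cons] at *
    by_cases h : (avail.contains y && !(acc.contains y)) = true
    · rw [if_pos h, ih]
      simp only [Bool.and_eq_true, Bool.not_eq_true', List.contains_eq_mem,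
        decide_eq_true_eq, decide_eq_false_iff_not] at h
      simp only [List.mem_append, List.mem_cons, List.not_mem_nil, or_false]
      obtain ⟨hy1, hy2⟩ := h
      constructor
      · rintro ((h1|rfl)|⟨h2,h3⟩) <;> tauto
      · rintro (h1|⟨ha,(rfl|hy)⟩) <;> tauto
    · rw [if_neg h, ih]
      simp only [Bool.and_eq_true, Bool.not_eq_true', List.contains_eq_mem,
        decide_eq_true_eq, decide_eq_false_iff_not, not_and, not_not] at h
      simp only [List.mem_cons]
      constructor
      · rintro (h1|⟨h2,h3⟩) <;> tauto
      · rintro (h1|⟨ha,(rfl|hy)⟩) <;> tauto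

theorem pvAdd_cons_notmem (avail : List String) (s : String) (acc xs : List String)
    (h : s ∉ xs) : pvAdd avail (s :: acc) xs = s :: pvAdd avail acc xs := by
  induction xs generalizing acc with
  | nil => rfl
  | cons y ys ih =>
    have hys : s ∉ ys := fun hm => h (List.mem_cons_of_mem _ hm)
    have hsy : ¬ (y = s) := fun he => h (by simp [he])
    simp only [pvAdd, List.foldl_cons] at *
    have hcns : (s :: acc).contains y = acc.contains y := by
      simp [List.contains_eq_mem, hsy]
    rw [hcns]
    by_cases hc : (avail.contains y && !(acc.contains y)) = true
    · rw [if_pos hc, if_pos hc, List.cons_append]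
      exact ih _ hys
    · rw [if_neg hc, if_neg hc]
      exact ih _ hys

-- the first-occurrence dedup fold, filtered to avail, is A's guarded-append fold
theorem filter_dedupFold (avail : List String) (xs s : List String) :
    (xs.foldl PySem.Set.add s).filter (fun c => avail.contains c)
      = pvAdd avail (s.filter (fun c => avail.contains c)) xs := by
  induction xs generalizing s with
  | nil => rfl
  | cons y ys ih =>
    simp only [pvAdd, List.foldl_cons] at *
    rw [ih]
    congr 1
    by_cases hp : y ∈ avail
    · by_cases hs : y ∈ s
      · simp [PySem.Set.add, hp, hs, List.contains_eq_mem, List.mem_filter]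
      · simp [PySem.Set.add, hp, hs, List.contains_eq_mem, List.mem_filter, List.filter_append]
    · by_cases hs : y ∈ s <;>
        simp [PySem.Set.add, hs, hp, List.filter_append, List.contains_eq_mem, List.mem_filter]

-- A's current-insert stage, merged into the single guarded-append form
theorem pv_head_some (avail m rest : List String) (s : String) :
    pvAdd avail
      (if s != "" && avail.contains s && !((pvAdd avail [] m).contains s)
       then s :: pvAdd avail [] m else pvAdd avail [] m) rest
    = pvAdd avail []
        ((if s != "" && avail.contains s && !(m.contains s) then [s] else []) ++ m ++ rest) := by
  rw [pvAdd_append, pvAdd_append]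
  congr 1
  by_cases h0 : (s != "") = true
  · by_cases h1 : avail.contains s = true
    · have hsav : s ∈ avail := by simpa [List.contains_eq_mem] using h1
      have hPm : (pvAdd avail [] m).contains s = m.contains s := by
        simp [List.contains_eq_mem, mem_pvAdd, hsav]
      by_cases h2 : m.contains s = true
      · have hsmm : s ∈ m := by simpa [List.contains_eq_mem] using h2
        have hsP : s ∈ pvAdd avail [] m := (mem_pvAdd avail s [] m).2 (Or.inr ⟨hsav, hsmm⟩)
        simp [pvAdd] at hsP
        simp [pvAdd, hsP, hsmm]
      · have hsm : s ∉ m := by simpa [List.contains_eq_mem] using h2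
        simp only [h0, h1, hPm, h2, Bool.and_self, Bool.not_false, if_true]
        have h3 : pvAdd avail [] [s] = [s] := by simp [pvAdd, hsav]
        rw [h3, pvAdd_cons_notmem avail s [] m hsm]
  -- condition reduces stepwise below
    · have h1f : avail.contains s = false := by
        cases hcc : avail.contains s with
        | false => rfl
        | true => exact absurd hcc h1
      have h1' : s ∉ avail := by simpa [List.contains_eq_mem] using h1f
      simp [pvAdd, h1']
  · simp only [Bool.not_eq_true] at h0
    simp [h0, pvAdd]

theorem pv_if_cons (p : Prop) [Decidable p] (s : String) (X : List String) :
    (if p then [s] ++ X else X) = (if p then [s] else []) ++ X := by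
  split <;> simp

-- B-side facts: the first-occurrence index key orders Set.ofList, so sorting avail's set by it
-- reproduces the filtered dedup.
theorem pvKey_cons_self (y : String) (xs : List String) : pvKey (y :: xs) y = 0 := by
  unfold pvKey
  rw [PySem.List.index?_cons_self]
  rfl

theorem pvKey_cons_of_ne_mem (y a : String) (xs : List String) (h : a ≠ y) (hm : a ∈ xs) :
    pvKey (y :: xs) a = pvKey xs a + 1 := by
  unfold pvKey
  rw [PySem.List.index?_cons_of_ne xs (Ne.symm h)]
  obtain ⟨k, hk⟩ := Option.isSome_iff_exists.1 ((PySem.List.index?_isSome_iff xs a).2 hm)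
  rw [hk]
  rfl

theorem pv_foldl_add_cons_acc (x : String) (xs : List String) : ∀ (acc : List String),
    List.foldl PySem.Set.add (x :: acc) xs
      = x :: List.foldl PySem.Set.add acc (xs.filter (fun y => !(y == x))) := by
  induction xs with
  | nil => intro acc; rfl
  | cons y ys ih =>
    intro acc
    by_cases hxy : y = x
    · subst hxy
      have h1 : PySem.Set.add (y :: acc) y = y :: acc := by
        simp [PySem.Set.add, PySem.Set.contains]
      have h2 : List.filter (fun z => !(z == y)) (y :: ys) = List.filter (fun z => !(z == y)) ys := by
        simp
      rw [h2, List.foldl_cons, h1, ih]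
    · have hf : List.filter (fun z => !(z == x)) (y :: ys)
          = y :: List.filter (fun z => !(z == x)) ys := by
        simp [hxy]
      rw [hf, List.foldl_cons, List.foldl_cons]
      by_cases hin : PySem.Set.contains acc y = true
      · have hmy : y ∈ acc := by simpa [PySem.Set.contains] using hin
        have h1 : PySem.Set.add (x :: acc) y = x :: acc := by
          simp [PySem.Set.add, PySem.Set.contains, hmy]
        have h2 : PySem.Set.add acc y = acc := by
          simp [PySem.Set.add, PySem.Set.contains, hmy]
        rw [h1, h2, ih]
      · have hny : y ∉ acc := by simpa [PySem.Set.contains] using hin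
        have h1 : PySem.Set.add (x :: acc) y = x :: (acc ++ [y]) := by
          simp [PySem.Set.add, PySem.Set.contains, hxy, hny]
        have h2 : PySem.Set.add acc y = acc ++ [y] := by
          simp [PySem.Set.add, PySem.Set.contains, hny]
        rw [h1, h2, ih]

theorem pv_ofList_cons (x : String) (xs : List String) :
    PySem.Set.ofList (x :: xs) = x :: PySem.Set.ofList (xs.filter (fun y => !(y == x))) := by
  have h1 : PySem.Set.ofList (x :: xs) = List.foldl PySem.Set.add [x] xs := by
    rw [PySem.Set.ofList_eq_foldl]
    rfl
  rw [h1, pv_foldl_add_cons_acc, PySem.Set.ofList_eq_foldl]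

theorem pvKey_filter_mono (x : String) : ∀ (xs : List String) (a b : String), a ≠ x → b ≠ x →
    a ∈ xs → b ∈ xs →
    pvKey (xs.filter (fun y => !(y == x))) a < pvKey (xs.filter (fun y => !(y == x))) b →
    pvKey xs a < pvKey xs b := by
  intro xs
  induction xs with
  | nil => intro a b _ _ ha; cases ha
  | cons y ys ih =>
    intro a b hax hbx ha hb hlt
    by_cases hyx : y = x
    · subst hyx
      have ha' : a ∈ ys := by cases ha with | head => exact absurd rfl hax | tail _ h => exact h
      have hb' : b ∈ ys := by cases hb with | head => exact absurd rfl hbx | tail _ h => exact h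
      rw [List.filter_cons_of_neg (by simp)] at hlt
      rw [pvKey_cons_of_ne_mem _ _ _ hax ha', pvKey_cons_of_ne_mem _ _ _ hbx hb']
      exact Nat.succ_lt_succ (ih a b hax hbx ha' hb' hlt)
    · rw [List.filter_cons_of_pos (by simp [hyx])] at hlt
      by_cases hby : b = y
      · subst hby
        rw [pvKey_cons_self] at hlt
        exact absurd hlt (Nat.not_lt_zero _)
      · have hb' : b ∈ ys := by cases hb with | head => exact absurd rfl hby | tail _ h => exact h
        by_cases hay : a = y
        · subst hay
          rw [pvKey_cons_self, pvKey_cons_of_ne_mem _ _ _ hby hb']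
          exact Nat.succ_pos _
        · have ha' : a ∈ ys := by cases ha with | head => exact absurd rfl hay | tail _ h => exact h
          have haf : a ∈ ys.filter (fun y => !(y == x)) := List.mem_filter.2 ⟨ha', by simp [hax]⟩
          have hbf : b ∈ ys.filter (fun y => !(y == x)) := List.mem_filter.2 ⟨hb', by simp [hbx]⟩
          rw [pvKey_cons_of_ne_mem _ _ _ hay haf, pvKey_cons_of_ne_mem _ _ _ hby hbf] at hlt
          rw [pvKey_cons_of_ne_mem _ _ _ hay ha', pvKey_cons_of_ne_mem _ _ _ hby hb']
          exact Nat.succ_lt_succ (ih a b hax hbx ha' hb' (Nat.lt_of_succ_lt_succ hlt))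

theorem pv_pairwise_pvKey (seq : List String) :
    (PySem.Set.ofList seq).Pairwise (fun a b => pvKey seq a < pvKey seq b) := by
  induction hn : seq.length using Nat.strong_induction_on generalizing seq with
  | _ n ih =>
    cases seq with
    | nil => simp [PySem.Set.ofList]
    | cons x xs =>
      rw [pv_ofList_cons]
      constructor
      · intro b hbmem
        have hb : b ∈ xs.filter (fun y => !(y == x)) := by
          have := (PySem.Set.mem_ofList _ _).1 hbmem
          exact this
        have hbx : b ≠ x := by
          have := (List.mem_filter.1 hb).2
          simpa using this
        have hbxs : b ∈ xs := (List.mem_filter.1 hb).1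
        rw [pvKey_cons_self, pvKey_cons_of_ne_mem _ _ _ hbx hbxs]
        exact Nat.succ_pos _
      · have hlen : (xs.filter (fun y => !(y == x))).length < n := by
          subst hn
          exact Nat.lt_succ_of_le (List.length_filter_le _ _)
        have hpw := ih _ hlen (xs.filter (fun y => !(y == x))) rfl
        refine hpw.imp_of_mem ?_
        intro a b hamem hbmem hab
        have ha := List.mem_filter.1 ((PySem.Set.mem_ofList _ _).1 hamem)
        have hb := List.mem_filter.1 ((PySem.Set.mem_ofList _ _).1 hbmem)
        have hax : a ≠ x := by simpa using ha.2
        have hbx : b ≠ x := by simpa using hb.2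
        have hcore := pvKey_filter_mono x xs a b hax hbx ha.1 hb.1 hab
        rw [pvKey_cons_of_ne_mem _ _ _ hax ha.1, pvKey_cons_of_ne_mem _ _ _ hbx hb.1]
        exact Nat.succ_lt_succ hcore

-- sorting avail's set by first position in seq = the seq dedup restricted to avail
theorem pv_sort_eq_filter (avail seq : List String) (hsub : ∀ c ∈ avail, c ∈ seq) :
    PySem.List.sorted (PySem.Set.ofList avail) (pvKey seq) false
      = (List.foldl PySem.Set.add [] seq).filter (fun c => avail.contains c) := by
  have hfold : List.foldl PySem.Set.add [] seq = PySem.Set.ofList seq :=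
    (PySem.Set.ofList_eq_foldl seq).symm
  rw [hfold]
  apply PySem.List.sorted_eq_of_perm_of_pairwise_lt
  · apply (List.perm_ext_iff_of_nodup (List.Nodup.filter _ (PySem.Set.nodup_ofList seq))
      (PySem.Set.nodup_ofList avail)).2
    intro c
    simp only [List.mem_filter, PySem.Set.mem_ofList, List.contains_eq_mem, decide_eq_true_eq]
    exact ⟨fun h => h.2, fun h => ⟨hsub c h, h⟩⟩
  · exact (pv_pairwise_pvKey seq).filter _

-- ===== VERDICT (by name: the statement is the Claim_ definition above) =====
set_option maxHeartbeats 3200000 in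
theorem suggest_calendars_py_spec : Claim_equal_suggest_calendars_py := by
  unfold Claim_equal_suggest_calendars_py
  intro exch_code avail current _hd
  unfold Spec_suggest_calendars_py suggest_calendars_py suggest_calendars_py_alt pvRules pvPopular
  cases current with
  | none =>
    simp only [List.flatMap_cons, List.flatMap_nil, List.append_nil, List.any_cons, List.any_nil,
      Bool.or_false,
      show (("contains" : String) == "contains") = true by decide,
      show (("exact" : String) == "contains") = false by decide, Bool.false_eq_true, if_false, if_true, pvAdd_if]
    rw [pv_sort_eq_filter _ _ (by intro c hc; simp [hc])]
    rw [filter_dedupFold]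
    simp only [List.filter_nil]
    simp only [← pvAdd_append]
    simp only [List.append_assoc]
  | some s =>
    simp only [List.flatMap_cons, List.flatMap_nil, List.append_nil, List.any_cons, List.any_nil,
      Bool.or_false,
      show (("contains" : String) == "contains") = true by decide,
      show (("exact" : String) == "contains") = false by decide, Bool.false_eq_true, if_false, if_true, pvAdd_if]
    rw [pv_if_cons]
    rw [pv_sort_eq_filter _ _ (by intro c hc; simp [hc])]
    rw [filter_dedupFold]
    simp only [List.filter_nil]
    simp only [← pvAdd_append]
    rw [pv_head_some]
    simp only [List.append_assoc]
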